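-- pv_equiv track=rewrite | github.com/Rohit-Kannachel/Programming_Problems | problem_set/Q2_Chinese_Zodiac.py | chinese_new_year
-- ===== SOURCE A (Python) =====
-- chinese_dict= {
--     'animals': ["Rat","Ox","Tiger","Rabbit","Dragon","Snake","Horse","Goat","Monkey","Rooster","Dog","Pig"],
--     'elements': ["Fire", "Earth", "Metal", "Water", "Wood"]
-- }
--
-- def chinese_new_year(x):
--     x = int(x)
--     year = (x-2024) % 60
--     result=[]
--     for element in chinese_dict["elements"]:
--         for animal in chinese_dict["animals"]:
--             order = f"{element} {animal}"
--             result.append(order)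
--     Zodiac = result[year]
--     if x<2024:
--         Messege = f"{x} was the year of the {Zodiac}"
--     else:
--         Messege = f"{x} is the year of the {Zodiac}"
--     return Messege
-- ===== SOURCE B (Python) =====
-- ELEMENTS = ["Fire", "Earth", "Metal", "Water", "Wood"]
-- ANIMALS = ["Rat","Ox","Tiger","Rabbit","Dragon","Snake","Horse","Goat","Monkey","Rooster","Dog","Pig"]
--
-- def chinese_new_year(x):
--     x = int(x)
--     year = (x - 2024) % 60
--     zodiac = f"{ELEMENTS[year // 12]} {ANIMALS[year % 12]}"
--     verb = "was" if x < 2024 else "is"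
--     return f"{x} {verb} the year of the {zodiac}"
-- ===== Notes on version B (the rewrite author's own statement) =====
-- stated objective: simpler
-- what changed: B drops the nested loop that materializes all 60 element-animal strings and instead indexes the two constant lists directly with year // 12 and year % 12.
import Mathlib
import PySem

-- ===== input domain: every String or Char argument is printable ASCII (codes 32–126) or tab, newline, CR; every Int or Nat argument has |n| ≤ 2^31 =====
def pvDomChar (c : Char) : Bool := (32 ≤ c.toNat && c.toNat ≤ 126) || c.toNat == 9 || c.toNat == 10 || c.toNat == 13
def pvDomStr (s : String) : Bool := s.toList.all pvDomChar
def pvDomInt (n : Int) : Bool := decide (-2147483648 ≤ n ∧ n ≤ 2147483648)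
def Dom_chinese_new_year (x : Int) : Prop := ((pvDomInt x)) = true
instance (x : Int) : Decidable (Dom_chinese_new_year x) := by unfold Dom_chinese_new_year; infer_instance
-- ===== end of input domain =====

-- B replaces A's nested loop building all 60 "element animal" strings by direct
-- closed-form indexing elements[year // 12], animals[year % 12] (objective: simpler).

-- shared module constants (chinese_dict's two lists)
def chineseAnimals : List String :=
  ["Rat","Ox","Tiger","Rabbit","Dragon","Snake","Horse","Goat","Monkey","Rooster","Dog","Pig"]
def chineseElements : List String := ["Fire", "Earth", "Metal", "Water", "Wood"]

-- ===== PORT A =====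
def chinese_new_year (x : Int) : String :=
  -- year = (x-2024) % 60 ; result = the 60 "element animal" strings built by the nested loop
  if x < 2024 then
    PySem.Int.toStr x ++ " was the year of the " ++
      PySem.List.pyGetD
        (chineseElements.foldl (fun acc element =>
          chineseAnimals.foldl (fun acc animal => acc ++ [element ++ " " ++ animal]) acc) [])
        (PySem.Int.mod (x - 2024) 60) ""
  else
    PySem.Int.toStr x ++ " is the year of the " ++
      PySem.List.pyGetD
        (chineseElements.foldl (fun acc element =>
          chineseAnimals.foldl (fun acc animal => acc ++ [element ++ " " ++ animal]) acc) [])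
        (PySem.Int.mod (x - 2024) 60) ""

-- ===== PORT B =====
def chinese_new_year_alt (x : Int) : String :=
  -- year = (x-2024) % 60 ; zodiac = ELEMENTS[year // 12] + " " + ANIMALS[year % 12]
  PySem.Int.toStr x ++ " " ++ (if x < 2024 then "was" else "is") ++ " the year of the " ++
    (PySem.List.pyGetD chineseElements (PySem.Int.floordiv (PySem.Int.mod (x - 2024) 60) 12) ""
      ++ " " ++ PySem.List.pyGetD chineseAnimals (PySem.Int.mod (PySem.Int.mod (x - 2024) 60) 12) "")

-- ===== PRECONDITION & SPEC =====
def Spec_chinese_new_year (x : Int) (out : String) : Prop := out = chinese_new_year_alt x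
instance (x : Int) (out : String) : Decidable (Spec_chinese_new_year x out) := by unfold Spec_chinese_new_year; infer_instance

-- ===== CLAIM (what is proved, stated in full; the proofs are below) =====
def Claim_equal_chinese_new_year : Prop := ∀ (x : Int), Dom_chinese_new_year x → Spec_chinese_new_year x (chinese_new_year x)

-- ===== LEMMAS AND PROOFS =====

-- A's 60-entry table, indexed at y ∈ [0,60), agrees with B's closed-form pair of lookups.
theorem table_lookup_eq (y : Int) (h0 : 0 ≤ y) (h1 : y < 60) :
    PySem.List.pyGetD
      (chineseElements.foldl (fun acc element =>
        chineseAnimals.foldl (fun acc animal => acc ++ [element ++ " " ++ animal]) acc) []) y ""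
    = PySem.List.pyGetD chineseElements (PySem.Int.floordiv y 12) ""
        ++ " " ++ PySem.List.pyGetD chineseAnimals (PySem.Int.mod y 12) "" := by
  interval_cases y <;> rfl

theorem msg_was (t z : String) :
    t ++ " was the year of the " ++ z = t ++ " " ++ "was" ++ " the year of the " ++ z := by
  simp [String.append_assoc]

theorem msg_is (t z : String) :
    t ++ " is the year of the " ++ z = t ++ " " ++ "is" ++ " the year of the " ++ z := by
  simp [String.append_assoc]

theorem chinese_new_year_spec : Claim_equal_chinese_new_year := by
  intro x _
  unfold Spec_chinese_new_year chinese_new_year chinese_new_year_alt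
  have h0 : (0:Int) ≤ PySem.Int.mod (x - 2024) 60 := PySem.Int.mod_nonneg _ (by norm_num)
  have h1 : PySem.Int.mod (x - 2024) 60 < 60 := PySem.Int.mod_lt _ (by norm_num)
  rw [table_lookup_eq _ h0 h1]
  by_cases hx : x < 2024
  · rw [if_pos hx, if_pos hx]; exact msg_was _ _
  · rw [if_neg hx, if_neg hx]; exact msg_is _ _
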